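-- pv_equiv track=rewrite | github.com/JaeHong-Park987/Programmers | 프로그래머스/lv1/12918. 문자열 다루기 기본/문자열 다루기 기본.py | solution
-- ===== SOURCE A (Python) =====
-- def solution(s):
--     length = len(s)
--     num_list = ['0','1','2','3','4','5','6','7','8','9']
--
--     if length == 4 or length == 6:
--         for i in s:
--             if i not in num_list:
--                 return False
--         return True
--     else:
--         return False
-- ===== SOURCE B (Python) =====
-- import re
--
-- def solution(s):
--     return bool(re.fullmatch(r'[0-9]{4}|[0-9]{6}', s))
-- ===== Notes on version B (the rewrite author's own statement) =====
-- stated objective: idiomatic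
-- what changed: Replaced the explicit length check plus per-character membership loop over a hand-written digit list with a single regex fullmatch of [0-9]{4}|[0-9]{6}, which enforces length and digit-ness in one pass.
import Mathlib
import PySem

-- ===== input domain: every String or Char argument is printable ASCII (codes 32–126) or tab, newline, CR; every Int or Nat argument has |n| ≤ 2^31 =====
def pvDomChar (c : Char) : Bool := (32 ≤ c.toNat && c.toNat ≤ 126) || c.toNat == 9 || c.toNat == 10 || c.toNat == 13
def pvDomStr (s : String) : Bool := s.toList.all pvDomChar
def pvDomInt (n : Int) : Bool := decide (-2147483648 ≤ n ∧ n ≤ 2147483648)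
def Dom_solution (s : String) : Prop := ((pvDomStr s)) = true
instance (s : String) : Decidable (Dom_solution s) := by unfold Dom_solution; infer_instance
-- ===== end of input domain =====

-- B replaces A's length check + membership loop with a regex fullmatch of [0-9]{4}|[0-9]{6} (idiomatic; same cost).


-- ===== PORT A =====
-- the for-loop with early `return False`
def solutionLoopA (numList : List Char) : List Char → Bool
  | [] => true
  | c :: rest => if ¬ (numList.contains c) then false else solutionLoopA numList rest

def solution (s : String) : Bool :=
  let length := s.toList.length
  let numList : List Char := ['0','1','2','3','4','5','6','7','8','9']
  if length = 4 ∨ length = 6 then solutionLoopA numList s.toList else false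

-- ===== PORT B =====
-- hand port of re.fullmatch(r'[0-9]{4}|[0-9]{6}', s): [0-9]{n} consumes exactly n chars in '0'..'9'
-- (exact for this pattern: no backtracking interaction between the two alternatives on a full match)
def matchDigitsExactly : Nat → List Char → Bool
  | 0, [] => true
  | 0, _ :: _ => false
  | _ + 1, [] => false
  | n + 1, c :: cs => if 48 ≤ c.toNat ∧ c.toNat ≤ 57 then matchDigitsExactly n cs else false

def solution_alt (s : String) : Bool :=
  matchDigitsExactly 4 s.toList || matchDigitsExactly 6 s.toList

-- ===== PRECONDITION & SPEC =====
def Spec_solution (s : String) (out : Bool) : Prop := out = solution_alt s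
instance (s : String) (out : Bool) : Decidable (Spec_solution s out) := by unfold Spec_solution; infer_instance

-- ===== CLAIM (what is proved, stated in full; the proofs are below) =====
def Claim_equal_solution : Prop := ∀ (s : String), Dom_solution s → Spec_solution s (solution s)

-- ===== LEMMAS AND PROOFS =====

def isDig (c : Char) : Bool := decide (48 ≤ c.toNat ∧ c.toNat ≤ 57)

lemma contains_eq_isDig (c : Char) :
    (['0','1','2','3','4','5','6','7','8','9'] : List Char).contains c = isDig c := by
  by_cases h : (['0','1','2','3','4','5','6','7','8','9'] : List Char).contains c
  · rw [h]
    simp only [List.contains_eq_mem, List.mem_cons, List.not_mem_nil, or_false,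
      decide_eq_true_eq] at h
    unfold isDig
    rcases h with h|h|h|h|h|h|h|h|h|h <;> subst h <;> decide
  · rw [Bool.not_eq_true] at h
    rw [h]
    symm
    unfold isDig
    simp only [decide_eq_false_iff_not, not_and, not_le]
    intro h1
    by_contra h2
    push Not at h2
    have hmem : c ∈ (['0','1','2','3','4','5','6','7','8','9'] : List Char) := by
      have : c = Char.ofNat c.toNat := (Char.ofNat_toNat c).symm
      interval_cases hc : c.toNat <;> rw [this] <;> decide
    simp [List.contains_eq_mem, hmem] at h
  
lemma loopA_eq_all (cs : List Char) :
    solutionLoopA ['0','1','2','3','4','5','6','7','8','9'] cs = cs.all isDig := by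
  induction cs with
  | nil => rfl
  | cons c rest ih =>
    simp only [solutionLoopA, List.all_cons, ih, contains_eq_isDig]
    cases hd : isDig c <;> simp

lemma match_eq (n : Nat) (cs : List Char) :
    matchDigitsExactly n cs = (decide (cs.length = n) && cs.all isDig) := by
  induction cs generalizing n with
  | nil => cases n <;> simp [matchDigitsExactly]
  | cons c rest ih =>
    cases n with
    | zero => simp [matchDigitsExactly]
    | succ m =>
      simp only [matchDigitsExactly, ih, List.all_cons, List.length_cons]
      by_cases h : 48 ≤ c.toNat ∧ c.toNat ≤ 57
      · have : isDig c = true := by unfold isDig; exact decide_eq_true h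
        simp [h, this]
      · have : isDig c = false := by unfold isDig; exact decide_eq_false h
        simp [h, this]

-- ===== VERDICT (by name: the statement is the Claim_ definition above) =====
theorem solution_spec : Claim_equal_solution := by
  intro s _
  unfold Spec_solution solution solution_alt
  simp only [loopA_eq_all, match_eq]
  by_cases h4 : s.toList.length = 4
  · simp [h4]
  · by_cases h6 : s.toList.length = 6
    · simp [h6]
    · cases hall : s.toList.all isDig <;> simp
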